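-- pv_equiv track=rewrite | github.com/youbin-shin/Solving-coding-problems | programmers 문제 모음/연습문제/탐욕법(Greedy)/체육복.py | solution
-- ===== SOURCE A (Python) =====
-- def solution(n, lost, reserve):
--     answer = n - len(lost) # 현재 체육복을 안잃어버린 학생 수 answer에 저장
--
--      # lost, reserve에 모두 있는 학생은 제외하기
--     temp = []
--     for i in lost:
--         if i in reserve:
--             reserve.pop(reserve.index(i))
--             temp.append(i)
--             answer += 1
--     while temp:
--         lost.pop(lost.index(temp.pop()))
--
--     # 정렬 후 체육복 빌려줄 수 있는 경우 구하기
--     lost.sort()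
--     reserve.sort()
--     reserve_check = [True] * len(reserve) # 이미 빌려준 체육복인지 확인하는 리스트
--     for l in range(len(lost)):
--         for r in range(len(reserve)):
--             if reserve_check[r] and (lost[l]-1 == reserve[r] or lost[l] +1 == reserve[r]):
--                 reserve_check[r] = False
--                 answer += 1
--                 break
--     return answer
-- ===== SOURCE B (Python) =====
-- def solution(n, lost, reserve):
--     # Sort once, cancel lost/reserve overlaps with a single merge walk,
--     # then match remaining lost students with a two-pointer greedy pass
--     # (prefer number-1 over number+1). Does not mutate its arguments.
--     L = sorted(lost)
--     R = sorted(reserve)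
--     L2, R2 = [], []
--     common = 0
--     i = j = 0
--     while i < len(L) and j < len(R):
--         if L[i] == R[j]:
--             common += 1
--             i += 1
--             j += 1
--         elif L[i] < R[j]:
--             L2.append(L[i])
--             i += 1
--         else:
--             R2.append(R[j])
--             j += 1
--     L2.extend(L[i:])
--     R2.extend(R[j:])
--     matched = 0
--     j = 0
--     for l in L2:
--         while j < len(R2) and R2[j] < l - 1:
--             j += 1
--         if j < len(R2) and (R2[j] == l - 1 or R2[j] == l + 1):
--             matched += 1
--             j += 1
--     return n - len(L) + common + matched
-- ===== Notes on version B (the rewrite author's own statement) =====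
-- stated objective: faster
-- what changed: Replaces A's repeated list membership/index/pop intersection loop and quadratic nested scan over a check array with one sort of each list, a single merge walk that cancels the lost/reserve overlap, and a single two-pointer greedy pass (prefer number-1 over number+1); B also does not mutate its arguments.
import Mathlib
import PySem

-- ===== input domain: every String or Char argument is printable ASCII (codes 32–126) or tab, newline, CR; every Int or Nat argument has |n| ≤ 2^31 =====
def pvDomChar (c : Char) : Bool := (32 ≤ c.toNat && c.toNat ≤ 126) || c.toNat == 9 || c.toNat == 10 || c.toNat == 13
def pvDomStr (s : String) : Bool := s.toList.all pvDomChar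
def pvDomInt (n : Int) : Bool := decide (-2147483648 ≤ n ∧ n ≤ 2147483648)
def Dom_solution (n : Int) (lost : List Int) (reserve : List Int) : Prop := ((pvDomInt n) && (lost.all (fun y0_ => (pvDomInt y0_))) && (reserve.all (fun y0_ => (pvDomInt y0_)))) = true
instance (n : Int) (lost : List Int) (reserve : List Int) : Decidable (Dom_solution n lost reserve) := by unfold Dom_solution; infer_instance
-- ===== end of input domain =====

-- B replaces A's quadratic membership/pop intersection loop and nested check-array scan by one sort of each
-- list, a single merge walk and a single two-pointer greedy pass; A mutates lost/reserve in place, B does not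
-- (the equivalence proved here is about the return value).


-- ===== PORT A =====

-- xs.pop(xs.index(i)): remove the element at the first index of i (both fallbacks are unreachable:
-- A only calls this under an 'i in xs' guard, so index? is some and pop? is in range)
def pvPopIdx (xs : List Int) (i : Int) : List Int :=
  (PySem.List.index? xs i).elim xs
    (fun idx => (PySem.List.pop? xs (idx : Int)).elim xs (fun pr => pr.2))

-- "for i in lost: if i in reserve: reserve.pop(reserve.index(i)); temp.append(i); answer += 1"
def pvPhase1A : List Int → List Int → List Int → Int → List Int × List Int × Int
  | [], res, temp, ans => (res, temp, ans)
  | i :: rest, res, temp, ans =>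
      if i ∈ res then pvPhase1A rest (pvPopIdx res i) (temp ++ [i]) (ans + 1)
      else pvPhase1A rest res temp ans

-- "while temp: lost.pop(lost.index(temp.pop()))" — temp is popped from the back, so we walk temp.reverse
def pvWhileA : List Int → List Int → List Int
  | lost, [] => lost
  | lost, t :: rts => pvWhileA (pvPopIdx lost t) rts

-- inner "for r in range(len(reserve)) … break": scan reserve/check left to right, mark first match
def pvScanA (lv : Int) : List Int → List Bool → List Bool × Bool
  | r :: res, c :: check =>
      if c && (lv - 1 == r || lv + 1 == r) then (false :: check, true)
      else
        let p := pvScanA lv res check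
        (c :: p.1, p.2)
  | _, check => (check, false)

-- outer "for l in range(len(lost))"
def pvOuterA (res : List Int) : List Int → List Bool → Int → Int
  | [], _, ans => ans
  | l :: L, check, ans =>
      let p := pvScanA l res check
      pvOuterA res L p.1 (if p.2 then ans + 1 else ans)

def solution (n : Int) (lost : List Int) (reserve : List Int) : Int :=
  let answer := n - lost.length
  let p := pvPhase1A lost reserve [] answer
  let lost1 := pvWhileA lost p.2.1.reverse
  let lostS := PySem.List.sorted lost1 (fun x => x) false
  let resS := PySem.List.sorted p.1 (fun x => x) false
  let check := List.replicate resS.length true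
  pvOuterA resS lostS check p.2.2

-- ===== PORT B =====

-- merge walk over the two sorted lists: (L2, R2, common)
def pvMergeB : List Int → List Int → List Int × List Int × Int
  | [], R => ([], R, 0)
  | l :: L, [] => (l :: L, [], 0)
  | l :: L, r :: R =>
      if l = r then
        let p := pvMergeB L R
        (p.1, p.2.1, p.2.2 + 1)
      else if l < r then
        let p := pvMergeB L (r :: R)
        (l :: p.1, p.2.1, p.2.2)
      else
        let p := pvMergeB (l :: L) R
        (p.1, r :: p.2.1, p.2.2)
  termination_by L R => L.length + R.length

-- two-pointer greedy pass: advancing j over R2 = dropping a prefix of R2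
def pvGreedyB : List Int → List Int → Int
  | [], _ => 0
  | l :: L, R =>
      let R' := R.dropWhile (fun r => decide (r < l - 1))
      match R' with
      | [] => pvGreedyB L []
      | r :: rest => if r == l - 1 || r == l + 1 then 1 + pvGreedyB L rest else pvGreedyB L (r :: rest)

def solution_alt (n : Int) (lost : List Int) (reserve : List Int) : Int :=
  let L := PySem.List.sorted lost (fun x => x) false
  let R := PySem.List.sorted reserve (fun x => x) false
  let p := pvMergeB L R
  n - L.length + p.2.2 + pvGreedyB p.1 p.2.1

-- ===== PRECONDITION & SPEC =====
def Spec_solution (n : Int) (lost : List Int) (reserve : List Int) (out : Int) : Prop := out = solution_alt n lost reserve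
instance (n : Int) (lost : List Int) (reserve : List Int) (out : Int) : Decidable (Spec_solution n lost reserve out) := by unfold Spec_solution; infer_instance

-- ===== CLAIM (what is proved, stated in full; the proofs are below) =====
def Claim_equal_solution : Prop := ∀ (n : Int) (lost : List Int) (reserve : List Int), Dom_solution n lost reserve → Spec_solution n lost reserve (solution n lost reserve)

-- ===== LEMMAS AND PROOFS =====

-- reference greedy on values: take l-1 from R if present, else l+1
def pvGL : List Int → List Int → Int
  | [], _ => 0
  | l :: L, R =>
      if (l - 1) ∈ R then 1 + pvGL L (R.erase (l - 1))
      else if (l + 1) ∈ R then 1 + pvGL L (R.erase (l + 1))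
      else pvGL L R

-- values of res still marked available in check
def pvMask : List Int → List Bool → List Int
  | r :: res, c :: check => (if c then [r] else []) ++ pvMask res check
  | _, _ => []

theorem pv_eraseIdx_append (pre suf : List Int) (i : Int) :
    (pre ++ i :: suf).eraseIdx pre.length = pre ++ suf := by
  induction pre with
  | nil => simp
  | cons x xs ih => simpa using ih

theorem pvPopIdx_eq_erase (xs : List Int) (i : Int) (h : i ∈ xs) :
    pvPopIdx xs i = xs.erase i := by
  have hsome : (PySem.List.index? xs i).isSome := (PySem.List.index?_isSome_iff xs i).mpr h
  obtain ⟨k, hk⟩ := Option.isSome_iff_exists.mp hsome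
  obtain ⟨pre, suf, hxs, hlen, hpre⟩ := (PySem.List.index?_eq_some_iff xs i k).mp hk
  have hklt : k < xs.length := by
    rw [hxs, ← hlen]; simp
  unfold pvPopIdx
  rw [hk]
  simp only [Option.elim_some]
  rw [PySem.List.pop?_natCast xs k hklt]
  simp only [Option.elim_some]
  rw [hxs, ← hlen, pv_eraseIdx_append]
  rw [List.erase_append_right _ (by simpa using hpre)]
  simp

theorem pvPhase1A_spec (lost : List Int) : ∀ (res temp : List Int) (ans : Int),
    (∀ v, (pvPhase1A lost res temp ans).1.count v
        = res.count v - min (lost.count v) (res.count v)) ∧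
    (∀ v, (pvPhase1A lost res temp ans).2.1.count v
        = temp.count v + min (lost.count v) (res.count v)) ∧
    ((pvPhase1A lost res temp ans).2.2 + temp.length
        = ans + (pvPhase1A lost res temp ans).2.1.length) := by
  induction lost with
  | nil =>
    intro res temp ans
    refine ⟨fun v => by simp [pvPhase1A], fun v => by simp [pvPhase1A], by simp [pvPhase1A]⟩
  | cons i rest ih =>
    intro res temp ans
    by_cases hmem : i ∈ res
    · have hcnt : 1 ≤ res.count i := List.count_pos_iff.mpr hmem
      obtain ⟨h1, h2, h3⟩ := ih (res.erase i) (temp ++ [i]) (ans + 1)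
      simp only [pvPhase1A, if_pos hmem, pvPopIdx_eq_erase res i hmem]
      refine ⟨fun v => ?_, fun v => ?_, ?_⟩
      · rw [h1 v]
        by_cases hv : i = v
        · subst hv
          rw [List.count_erase_self, List.count_cons_self]
          omega
        · rw [List.count_erase_of_ne (Ne.symm hv), List.count_cons_of_ne hv]
      · rw [h2 v]
        by_cases hv : i = v
        · subst hv
          have hone : List.count i [i] = 1 := by simp
          rw [List.count_append, hone, List.count_erase_self, List.count_cons_self]
          omega
        · have hzero : List.count v [i] = 0 := by simp [List.count_cons, hv]
          rw [List.count_append, hzero, List.count_erase_of_ne (Ne.symm hv),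
            List.count_cons_of_ne hv]
          omega
      · simp only [List.length_append, List.length_cons, List.length_nil] at h3 ⊢
        push_cast at h3 ⊢
        omega
    · have hz : List.count i res = 0 := List.count_eq_zero.mpr hmem
      obtain ⟨h1, h2, h3⟩ := ih res temp ans
      simp only [pvPhase1A, if_neg hmem]
      refine ⟨fun v => ?_, fun v => ?_, h3⟩
      · rw [h1 v]
        by_cases hv : i = v
        · subst hv; rw [List.count_cons_self]; omega
        · rw [List.count_cons_of_ne hv]
      · rw [h2 v]
        by_cases hv : i = v
        · subst hv; rw [List.count_cons_self]; omega
        · rw [List.count_cons_of_ne hv]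

theorem pvWhileA_spec (temp : List Int) : ∀ (lost : List Int),
    (∀ v, temp.count v ≤ lost.count v) →
    (∀ v, (pvWhileA lost temp).count v = lost.count v - temp.count v) ∧
    (pvWhileA lost temp).length = lost.length - temp.length := by
  induction temp with
  | nil =>
    intro lost _
    exact ⟨fun v => by simp [pvWhileA], by simp [pvWhileA]⟩
  | cons t rts ih =>
    intro lost h
    have h1 : 1 ≤ List.count t lost := by
      have := h t
      rw [List.count_cons_self] at this
      omega
    have htmem : t ∈ lost := List.count_pos_iff.mp h1
    have hle : ∀ v, rts.count v ≤ (lost.erase t).count v := by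
      intro v
      by_cases hv : t = v
      · subst hv
        have := h t
        rw [List.count_cons_self] at this
        rw [List.count_erase_self]
        omega
      · rw [List.count_erase_of_ne (Ne.symm hv)]
        have := h v
        rw [List.count_cons_of_ne hv] at this
        exact this
    obtain ⟨hc, hl⟩ := ih (lost.erase t) hle
    simp only [pvWhileA, pvPopIdx_eq_erase lost t htmem]
    constructor
    · intro v
      rw [hc v]
      by_cases hv : t = v
      · subst hv
        rw [List.count_erase_self, List.count_cons_self]
        omega
      · rw [List.count_erase_of_ne (Ne.symm hv), List.count_cons_of_ne hv]
    · rw [hl, List.length_erase_of_mem htmem]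
      simp only [List.length_cons]
      omega

theorem pvMask_subset : ∀ (res : List Int) (check : List Bool),
    ∀ x ∈ pvMask res check, x ∈ res := by
  intro res
  induction res with
  | nil => intro check x hx; simp [pvMask] at hx
  | cons r res ih =>
    intro check x hx
    cases check with
    | nil => simp [pvMask] at hx
    | cons c check =>
      simp only [pvMask, List.mem_append] at hx
      rcases hx with hx | hx
      · cases c with
        | true => simp at hx; simp [hx]
        | false => simp at hx
      · exact List.mem_cons_of_mem _ (ih check x hx)

theorem pvMask_replicate : ∀ (res : List Int),
    pvMask res (List.replicate res.length true) = res := by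
  intro res
  induction res with
  | nil => simp [pvMask]
  | cons r res ih => simp [pvMask, List.replicate_succ, ih]

theorem pvScanA_spec (lv : Int) : ∀ (res : List Int), res.Pairwise (· ≤ ·) → ∀ (check : List Bool),
    (if (lv - 1) ∈ pvMask res check then
        (pvScanA lv res check).2 = true ∧
        pvMask res (pvScanA lv res check).1 = (pvMask res check).erase (lv - 1)
     else if (lv + 1) ∈ pvMask res check then
        (pvScanA lv res check).2 = true ∧
        pvMask res (pvScanA lv res check).1 = (pvMask res check).erase (lv + 1)
     else pvScanA lv res check = (check, false)) := by
  intro res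
  induction res with
  | nil => intro _ check; simp [pvScanA, pvMask]
  | cons r res ih =>
    intro hs check
    obtain ⟨hr, hstail⟩ := List.pairwise_cons.mp hs
    cases check with
    | nil => simp [pvScanA, pvMask]
    | cons c check =>
      cases c with
      | false =>
        have H := ih hstail check
        have e1 : pvScanA lv (r :: res) (false :: check)
            = (false :: (pvScanA lv res check).1, (pvScanA lv res check).2) := by
          simp [pvScanA]
        have e2 : ∀ x, pvMask (r :: res) (false :: x) = pvMask res x := fun x => by simp [pvMask]
        rw [e1, e2, e2]
        split_ifs at H ⊢ with g1 g2
        · exact H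
        · exact H
        · rw [H]
      | true =>
        by_cases hm : ((lv - 1 == r) || (lv + 1 == r)) = true
        · have e1 : pvScanA lv (r :: res) (true :: check) = (false :: check, true) := by
            simp [pvScanA, hm]
          have e2f : pvMask (r :: res) (false :: check) = pvMask res check := by simp [pvMask]
          have e2t : pvMask (r :: res) (true :: check) = r :: pvMask res check := by simp [pvMask]
          by_cases h1 : lv - 1 = r
          · have hmem : (lv - 1) ∈ pvMask (r :: res) (true :: check) := by
              rw [e2t, h1]; exact List.mem_cons_self
            rw [if_pos hmem]
            refine ⟨by rw [e1], ?_⟩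
            rw [e1]
            simp only [e2f, e2t, h1]
            rw [List.erase_cons_head]
          · have h2 : lv + 1 = r := by
              rcases Bool.or_eq_true_iff.mp hm with hx | hx
              · exact absurd (beq_iff_eq.mp hx) h1
              · exact beq_iff_eq.mp hx
            have htail : ∀ x ∈ pvMask res check, r ≤ x :=
              fun x hx => hr x (pvMask_subset res check x hx)
            have hnot : (lv - 1) ∉ pvMask (r :: res) (true :: check) := by
              rw [e2t]
              intro hmem
              rcases List.mem_cons.mp hmem with he | he
              · omega
              · have := htail _ he; omega
            have hmem2 : (lv + 1) ∈ pvMask (r :: res) (true :: check) := by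
              rw [e2t, h2]; exact List.mem_cons_self
            rw [if_neg hnot, if_pos hmem2]
            refine ⟨by rw [e1], ?_⟩
            rw [e1]
            simp only [e2f, e2t, h2]
            rw [List.erase_cons_head]
        · have hne1 : lv - 1 ≠ r := fun he => hm (by simp [he])
          have hne2 : lv + 1 ≠ r := fun he => hm (by simp [he])
          have hmb : ((lv - 1 == r) || (lv + 1 == r)) = false := by
            simpa using hm
          have e1 : pvScanA lv (r :: res) (true :: check)
              = (true :: (pvScanA lv res check).1, (pvScanA lv res check).2) := by
            simp [pvScanA, hmb]
          have e2t : ∀ x, pvMask (r :: res) (true :: x) = r :: pvMask res x := fun x => by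
            simp [pvMask]
          have hb1 : (r == lv - 1) = false := by simp [Ne.symm hne1]
          have hb2 : (r == lv + 1) = false := by simp [Ne.symm hne2]
          have H := ih hstail check
          rw [e1, e2t, e2t]
          have m1 : ((lv - 1) ∈ r :: pvMask res check) ↔ (lv - 1) ∈ pvMask res check := by
            simp [List.mem_cons, hne1]
          have m2 : ((lv + 1) ∈ r :: pvMask res check) ↔ (lv + 1) ∈ pvMask res check := by
            simp [List.mem_cons, hne2]
          simp only [m1, m2]
          split_ifs at H ⊢ with g1 g2
          · refine ⟨H.1, ?_⟩
            rw [List.erase_cons, hb1]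
            simp only [Bool.false_eq_true, if_false]
            rw [H.2]
          · refine ⟨H.1, ?_⟩
            rw [List.erase_cons, hb2]
            simp only [Bool.false_eq_true, if_false]
            rw [H.2]
          · rw [H]

theorem pvOuterA_eq_pvGL (res : List Int) (hs : res.Pairwise (· ≤ ·)) :
    ∀ (L : List Int) (check : List Bool) (ans : Int),
      pvOuterA res L check ans = ans + pvGL L (pvMask res check) := by
  intro L
  induction L with
  | nil => intro check ans; simp [pvOuterA, pvGL]
  | cons l L ih =>
    intro check ans
    have H := pvScanA_spec l res hs check
    have e1 : pvOuterA res (l :: L) check ans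
        = pvOuterA res L (pvScanA l res check).1
            (if (pvScanA l res check).2 = true then ans + 1 else ans) := by
      simp [pvOuterA]
    rw [e1, ih]
    split_ifs at H with g1 g2
    · rw [H.1]
      simp only [if_true, pvGL, if_pos g1, H.2]
      ring
    · rw [H.1]
      simp only [if_true, pvGL, if_neg g1, if_pos g2, H.2]
      ring
    · rw [H]
      simp only [pvGL, if_neg g1, if_neg g2]
      simp

theorem pvMergeB_spec : ∀ (L R : List Int), L.Pairwise (· ≤ ·) → R.Pairwise (· ≤ ·) →
    (∀ v, (pvMergeB L R).1.count v = L.count v - min (L.count v) (R.count v)) ∧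
    (∀ v, (pvMergeB L R).2.1.count v = R.count v - min (L.count v) (R.count v)) ∧
    ((pvMergeB L R).2.2 + (pvMergeB L R).1.length = L.length) ∧
    (pvMergeB L R).1.Sublist L ∧ (pvMergeB L R).2.1.Sublist R := by
  intro L
  induction L with
  | nil =>
    intro R _ _
    simp [pvMergeB]
  | cons l L ihL =>
    intro R
    induction R with
    | nil =>
      intro _ _
      simp [pvMergeB]
    | cons r R ihR =>
      intro hL hR
      obtain ⟨hlL, hLt⟩ := List.pairwise_cons.mp hL
      obtain ⟨hrR, hRt⟩ := List.pairwise_cons.mp hR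
      by_cases heq : l = r
      · obtain ⟨q1, q2, q3, q4, q5⟩ := ihL R hLt hRt
        simp only [pvMergeB, if_pos heq]
        refine ⟨fun v => ?_, fun v => ?_, ?_, q4.cons _, q5.cons _⟩
        · rw [q1 v]
          by_cases hv : l = v
          · rw [← hv, ← heq, List.count_cons_self, List.count_cons_self]
            omega
          · rw [List.count_cons_of_ne hv, List.count_cons_of_ne (heq ▸ hv)]
        · rw [q2 v]
          by_cases hv : l = v
          · rw [← hv, ← heq, List.count_cons_self, List.count_cons_self]
            omega
          · rw [List.count_cons_of_ne hv, List.count_cons_of_ne (heq ▸ hv)]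
        · simp only [List.length_cons]
          push_cast
          omega
      · by_cases hlt : l < r
        · have hzl : List.count l (r :: R) = 0 := by
            apply List.count_eq_zero.mpr
            intro hmem
            rcases List.mem_cons.mp hmem with he | he
            · omega
            · have := hrR l he; omega
          obtain ⟨q1, q2, q3, q4, q5⟩ := ihL (r :: R) hLt hR
          simp only [pvMergeB, if_neg heq, if_pos hlt]
          refine ⟨fun v => ?_, fun v => ?_, ?_, q4.cons₂ _, q5⟩
          · by_cases hv : l = v
            · rw [← hv, List.count_cons_self, List.count_cons_self, q1 l, hzl]
              omega
            · rw [List.count_cons_of_ne hv, List.count_cons_of_ne hv, q1 v]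
          · by_cases hv : l = v
            · rw [← hv, List.count_cons_self, q2 l, hzl]
              omega
            · rw [List.count_cons_of_ne hv, q2 v]
          · simp only [List.length_cons]
            push_cast
            omega
        · have hgt : r < l := by omega
          have hzr : List.count r (l :: L) = 0 := by
            apply List.count_eq_zero.mpr
            intro hmem
            rcases List.mem_cons.mp hmem with he | he
            · omega
            · have := hlL r he; omega
          obtain ⟨q1, q2, q3, q4, q5⟩ := ihR hL hRt
          simp only [pvMergeB, if_neg heq, if_neg hlt]
          refine ⟨fun v => ?_, fun v => ?_, ?_, q4, q5.cons₂ _⟩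
          · by_cases hv : r = v
            · rw [← hv, List.count_cons_self, q1 r, hzr]
              omega
            · rw [List.count_cons_of_ne hv, q1 v]
          · by_cases hv : r = v
            · rw [← hv, List.count_cons_self, List.count_cons_self, q2 r, hzr]
              omega
            · rw [List.count_cons_of_ne hv, List.count_cons_of_ne hv, q2 v]
          · exact q3

theorem pv_dropWhile_head_false {p : Int → Bool} : ∀ (l : List Int) (x : Int) (xs : List Int),
    l.dropWhile p = x :: xs → p x = false := by
  intro l
  induction l with
  | nil => intro x xs h; simp [List.dropWhile] at h
  | cons a l ih =>
    intro x xs h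
    rw [List.dropWhile_cons] at h
    by_cases hp : p a
    · rw [if_pos hp] at h
      exact ih x xs h
    · rw [if_neg hp] at h
      cases h
      simpa using hp

theorem pvGreedyB_eq_pvGL (L : List Int) :
    ∀ (S R : List Int), L.Pairwise (· ≤ ·) → R.Pairwise (· ≤ ·) →
      (∀ s ∈ S, ∀ l' ∈ L, s < l' - 1) → (∀ l' ∈ L, l' ∉ R) →
      pvGreedyB L R = pvGL L (S ++ R) := by
  induction L with
  | nil => intro S R _ _ _ _; simp [pvGreedyB, pvGL]
  | cons l L ih =>
    intro S R hL hR hS hd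
    obtain ⟨hlL, hLt⟩ := List.pairwise_cons.mp hL
    have hsplit : R.takeWhile (fun r => decide (r < l - 1)) ++ R.dropWhile (fun r => decide (r < l - 1)) = R :=
      List.takeWhile_append_dropWhile
    have hDlt : ∀ d ∈ R.takeWhile (fun r => decide (r < l - 1)), d < l - 1 := by
      intro d hdm
      have := List.mem_takeWhile_imp hdm
      simpa using this
    have hSlt : ∀ s ∈ S, s < l - 1 := fun s hs => hS s hs l (by simp)
    have hjunk : ∀ x ∈ S ++ R.takeWhile (fun r => decide (r < l - 1)), x < l - 1 := by
      intro x hx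
      rcases List.mem_append.mp hx with h | h
      · exact hSlt x h
      · exact hDlt x h
    have hjunk' : ∀ s ∈ S ++ R.takeWhile (fun r => decide (r < l - 1)), ∀ l' ∈ L, s < l' - 1 := by
      intro s hs l' hl'
      have h1 := hjunk s hs
      have h2 := hlL l' hl'
      omega
    have e1 : pvGreedyB (l :: L) R =
        (match R.dropWhile (fun r => decide (r < l - 1)) with
         | [] => pvGreedyB L []
         | r :: rest => if r == l - 1 || r == l + 1 then 1 + pvGreedyB L rest else pvGreedyB L (r :: rest)) := by
      simp [pvGreedyB]
    cases hRc : R.dropWhile (fun r => decide (r < l - 1)) with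
    | nil =>
      have e2 : pvGreedyB (l :: L) R = pvGreedyB L [] := by rw [e1, hRc]
      rw [e2]
      have hR2 : R.takeWhile (fun r => decide (r < l - 1)) = R := by
        conv_rhs => rw [← hsplit, hRc]
        simp
      have hall : ∀ x ∈ S ++ R, x < l - 1 := by
        intro x hx
        rcases List.mem_append.mp hx with h | h
        · exact hSlt x h
        · rw [← hR2] at h; exact hDlt x h
      have g1 : (l - 1) ∉ S ++ R := fun hmem => absurd (hall _ hmem) (by omega)
      have g2 : (l + 1) ∉ S ++ R := fun hmem => absurd (hall _ hmem) (by omega)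
      simp only [pvGL, if_neg g1, if_neg g2]
      have := ih (S ++ R) [] hLt List.Pairwise.nil
        (by intro s hs l' hl'; have := hall s hs; have := hlL l' hl'; omega)
        (by intro l' _ hmem; simp at hmem)
      simpa using this
    | cons r rest =>
      have hrfalse : (decide (r < l - 1)) = false := pv_dropWhile_head_false R r rest hRc
      have hrge : l - 1 ≤ r := by
        have : ¬ (r < l - 1) := by simpa using hrfalse
        omega
      have hR'sub : (r :: rest).Sublist R := by
        rw [← hRc]; exact List.dropWhile_sublist _
      have hR'sorted : (r :: rest).Pairwise (· ≤ ·) := hR.sublist hR'sub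
      have hrrest : ∀ x ∈ rest, r ≤ x := (List.pairwise_cons.mp hR'sorted).1
      have hrR : r ∈ R := hR'sub.subset (by simp)
      have hrestR : ∀ x ∈ rest, x ∈ R := fun x hx => hR'sub.subset (by simp [hx])
      have hlnotR : l ∉ R := hd l (by simp)
      have hrl : r ≠ l := fun he => hlnotR (he ▸ hrR)
      have hSR : S ++ R = (S ++ R.takeWhile (fun r => decide (r < l - 1))) ++ (r :: rest) := by
        rw [List.append_assoc, ← hRc, hsplit]
      have hdtail : ∀ l' ∈ L, l' ∉ R := fun l' hl' => hd l' (List.mem_cons_of_mem _ hl')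
      have e2 : pvGreedyB (l :: L) R
          = if (r == l - 1 || r == l + 1) = true then 1 + pvGreedyB L rest
            else pvGreedyB L (r :: rest) := by
        rw [e1, hRc]
      rw [e2]
      by_cases h1 : r = l - 1
      · have hbeq : (r == l - 1 || r == l + 1) = true := by simp [h1]
        rw [if_pos hbeq]
        have hmem : (l - 1) ∈ S ++ R := List.mem_append.mpr (Or.inr (by rw [← h1]; exact hrR))
        simp only [pvGL, if_pos hmem]
        have herase : (S ++ R).erase (l - 1)
            = (S ++ R.takeWhile (fun r => decide (r < l - 1))) ++ rest := by
          rw [hSR, List.erase_append_right _ (fun hmem' => absurd (hjunk _ hmem') (by omega))]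
          rw [h1, List.erase_cons_head]
        rw [herase]
        rw [ih (S ++ R.takeWhile (fun r => decide (r < l - 1))) rest hLt
          (List.Pairwise.sublist (List.sublist_cons_self _ _) hR'sorted) hjunk'
          (fun l' hl' hmem' => hdtail l' hl' (hrestR _ hmem'))]
      · by_cases h2 : r = l + 1
        · have hbeq : (r == l - 1 || r == l + 1) = true := by simp [h2]
          rw [if_pos hbeq]
          have hnot1 : (l - 1) ∉ S ++ R := by
            rw [hSR]
            intro hmem
            rcases List.mem_append.mp hmem with h | h
            · have := hjunk _ h; omega
            · rcases List.mem_cons.mp h with he | he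
              · omega
              · have := hrrest _ he; omega
          have hmem2 : (l + 1) ∈ S ++ R := List.mem_append.mpr (Or.inr (by rw [← h2]; exact hrR))
          simp only [pvGL, if_neg hnot1, if_pos hmem2]
          have herase : (S ++ R).erase (l + 1)
              = (S ++ R.takeWhile (fun r => decide (r < l - 1))) ++ rest := by
            rw [hSR, List.erase_append_right _ (fun hmem' => absurd (hjunk _ hmem') (by omega))]
            rw [h2, List.erase_cons_head]
          rw [herase]
          rw [ih (S ++ R.takeWhile (fun r => decide (r < l - 1))) rest hLt
            (List.Pairwise.sublist (List.sublist_cons_self _ _) hR'sorted) hjunk'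
            (fun l' hl' hmem' => hdtail l' hl' (hrestR _ hmem'))]
        · have hge2 : l + 2 ≤ r := by omega
          have hbeq : (r == l - 1 || r == l + 1) = false := by simp [h1, h2]
          rw [hbeq]
          simp only [Bool.false_eq_true, if_false]
          have hnot1 : (l - 1) ∉ S ++ R := by
            rw [hSR]
            intro hmem
            rcases List.mem_append.mp hmem with h | h
            · have := hjunk _ h; omega
            · rcases List.mem_cons.mp h with he | he
              · omega
              · have := hrrest _ he; omega
          have hnot2 : (l + 1) ∉ S ++ R := by
            rw [hSR]
            intro hmem
            rcases List.mem_append.mp hmem with h | h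
            · have := hjunk _ h; omega
            · rcases List.mem_cons.mp h with he | he
              · omega
              · have := hrrest _ he; omega
          simp only [pvGL, if_neg hnot1, if_neg hnot2]
          rw [ih (S ++ R.takeWhile (fun r => decide (r < l - 1))) (r :: rest) hLt hR'sorted hjunk'
            (fun l' hl' hmem' => hdtail l' hl' (hR'sub.subset hmem'))]
          rw [← hSR]

-- ===== VERDICT (by name: the statement is the Claim_ definition above) =====
theorem solution_spec : Claim_equal_solution := by
  unfold Claim_equal_solution
  intro n lost reserve _
  unfold Spec_solution
  simp only [solution, solution_alt]
  obtain ⟨hp1, hp2, hp3⟩ := pvPhase1A_spec lost reserve [] (n - (lost.length : Int))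
  set p := pvPhase1A lost reserve [] (n - (lost.length : Int)) with hpdef
  simp only [List.count_nil, Nat.zero_add, List.length_nil, Nat.cast_zero, add_zero] at hp2 hp3
  have htle : ∀ v, p.2.1.count v ≤ lost.count v := by
    intro v; rw [hp2 v]; omega
  have htlerev : ∀ v, p.2.1.reverse.count v ≤ lost.count v := by
    intro v; rw [List.count_reverse]; exact htle v
  obtain ⟨hw1, hw2⟩ := pvWhileA_spec p.2.1.reverse lost htlerev
  set lost1 := pvWhileA lost p.2.1.reverse with hl1def
  have hLs : (PySem.List.sorted lost (fun x => x) false).Pairwise (· ≤ ·) :=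
    PySem.List.sorted_pairwise lost (fun x => x)
  have hRs : (PySem.List.sorted reserve (fun x => x) false).Pairwise (· ≤ ·) :=
    PySem.List.sorted_pairwise reserve (fun x => x)
  have hLperm : (PySem.List.sorted lost (fun x => x) false).Perm lost :=
    PySem.List.sorted_perm lost (fun x => x) false
  have hRperm : (PySem.List.sorted reserve (fun x => x) false).Perm reserve :=
    PySem.List.sorted_perm reserve (fun x => x) false
  obtain ⟨hm1, hm2, hm3, hm4, hm5⟩ := pvMergeB_spec _ _ hLs hRs
  set q := pvMergeB (PySem.List.sorted lost (fun x => x) false)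
      (PySem.List.sorted reserve (fun x => x) false) with hqdef
  have hLc : ∀ v, List.count v (PySem.List.sorted lost (fun x => x) false) = List.count v lost :=
    fun v => hLperm.count_eq v
  have hRc : ∀ v, List.count v (PySem.List.sorted reserve (fun x => x) false) = List.count v reserve :=
    fun v => hRperm.count_eq v
  have hL2perm : q.1.Perm lost1 := by
    rw [List.perm_iff_count]
    intro v
    rw [hm1 v, hw1 v, hLc v, hRc v, List.count_reverse, hp2 v]
  have hL2sorted : q.1.Pairwise (· ≤ ·) := hLs.sublist hm4
  have hLSeq : PySem.List.sorted lost1 (fun x => x) false = q.1 :=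
    PySem.List.sorted_id_eq_of_perm_of_pairwise lost1 q.1 hL2perm hL2sorted
  have hR2perm : q.2.1.Perm p.1 := by
    rw [List.perm_iff_count]
    intro v
    rw [hm2 v, hp1 v, hLc v, hRc v]
  have hR2sorted : q.2.1.Pairwise (· ≤ ·) := hRs.sublist hm5
  have hRSeq : PySem.List.sorted p.1 (fun x => x) false = q.2.1 :=
    PySem.List.sorted_id_eq_of_perm_of_pairwise p.1 q.2.1 hR2perm hR2sorted
  rw [hLSeq, hRSeq]
  rw [pvOuterA_eq_pvGL q.2.1 hR2sorted q.1 (List.replicate q.2.1.length true) p.2.2]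
  rw [pvMask_replicate]
  have hdisj : ∀ l' ∈ q.1, l' ∉ q.2.1 := by
    intro l' hmem hmem'
    have h1 : 0 < List.count l' q.1 := List.count_pos_iff.mpr hmem
    have h2 : 0 < List.count l' q.2.1 := List.count_pos_iff.mpr hmem'
    rw [hm1 l'] at h1
    rw [hm2 l'] at h2
    omega
  have hgreedy : pvGreedyB q.1 q.2.1 = pvGL q.1 q.2.1 := by
    have := pvGreedyB_eq_pvGL q.1 [] q.2.1 hL2sorted hR2sorted (by simp) hdisj
    simpa using this
  rw [← hgreedy]
  have hlen1 : (PySem.List.sorted lost (fun x => x) false).length = lost.length :=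
    hLperm.length_eq
  have hlenL2 : q.1.length = lost1.length := hL2perm.length_eq
  have htlen : p.2.1.length ≤ lost.length :=
    (List.subperm_iff_count.mpr htle).length_le
  rw [List.length_reverse] at hw2
  rw [hlen1] at hm3 ⊢
  generalize pvGreedyB q.1 q.2.1 = G
  omega
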